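-- pv_equiv track=rewrite | github.com/acarrasco/advent_of_code | 2023/day11/part2.py | calculate_offsets
-- ===== SOURCE A (Python) =====
-- def calculate_offsets(size, expansion_factor, occupied):
--     offsets = []
--     expanded = 0
--     for i in range(size):
--         offsets.append(expanded)
--         if i in occupied:
--             expanded += 1
--         else:
--             expanded += expansion_factor
--     return offsets
-- ===== SOURCE B (Python) =====
-- def calculate_offsets(size, expansion_factor, occupied):
--     # stage 1: bucket-mark which rows in [0, size) are occupied
--     marks = [False] * size
--     for p in occupied:
--         if 0 <= p < size:
--             marks[p] = True
--     # stage 2: prefix counts of occupied rows strictly below each index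
--     counts = [0]
--     for m in marks:
--         counts.append(counts[-1] + (1 if m else 0))
--     # stage 3: closed form offsets[i] = f*i - (f-1)*counts[i]
--     return [expansion_factor * i - (expansion_factor - 1) * counts[i]
--             for i in range(size)]
-- ===== Notes on version B (the rewrite author's own statement) =====
-- stated objective: alternative
-- what changed: B replaces A's single accumulating loop (append running sum, add 1 or expansion_factor per step with a linear membership test) by three staged passes: a bucket-mark boolean array over occupied, a prefix-count list, and a map through the closed form offsets[i] = f*i - (f-1)*count_below_i.
import Mathlib
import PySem

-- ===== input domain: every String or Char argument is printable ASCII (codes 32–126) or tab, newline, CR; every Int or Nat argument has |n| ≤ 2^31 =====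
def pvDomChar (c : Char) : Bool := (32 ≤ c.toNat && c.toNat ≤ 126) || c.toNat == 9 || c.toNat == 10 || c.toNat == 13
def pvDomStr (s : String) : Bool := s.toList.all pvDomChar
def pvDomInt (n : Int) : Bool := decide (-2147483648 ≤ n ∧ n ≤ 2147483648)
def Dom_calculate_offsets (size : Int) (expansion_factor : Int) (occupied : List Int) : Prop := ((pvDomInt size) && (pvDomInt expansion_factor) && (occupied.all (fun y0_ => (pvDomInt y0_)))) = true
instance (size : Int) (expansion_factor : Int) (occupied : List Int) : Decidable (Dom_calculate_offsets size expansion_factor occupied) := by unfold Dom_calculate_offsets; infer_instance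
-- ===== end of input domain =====

-- B replaces A's single accumulating loop by three staged passes: a bucket-mark array, a prefix-count list, and the closed form f*i - (f-1)*count_below_i (alternative decomposition).


-- ===== PORT A =====
def calculate_offsets (size : Int) (expansion_factor : Int) (occupied : List Int) : List Int :=
  ((PySem.List.pyRange 0 size 1).foldl
    (fun (st : List Int × Int) i =>
      (st.1 ++ [st.2], if occupied.contains i then st.2 + 1 else st.2 + expansion_factor))
    ([], 0)).1

-- ===== PORT B =====
def calculate_offsets_alt (size : Int) (expansion_factor : Int) (occupied : List Int) : List Int :=
  -- stage 1: bucket-mark which rows in [0, size) are occupied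
  let marks := occupied.foldl
    (fun ms p => if 0 ≤ p ∧ p < size then PySem.List.pySetD ms p true else ms)
    (List.replicate size.toNat false)
  -- stage 2: prefix counts (counts[-1] is the Python negative index)
  let counts := marks.foldl
    (fun cs m => cs ++ [PySem.List.pyGetD cs (-1) 0 + (if m then (1 : Int) else 0)])
    [(0 : Int)]
  -- stage 3: closed form
  (PySem.List.pyRange 0 size 1).map
    (fun i => expansion_factor * i - (expansion_factor - 1) * PySem.List.pyGetD counts i 0)

-- ===== PRECONDITION & SPEC =====
def Spec_calculate_offsets (size : Int) (expansion_factor : Int) (occupied : List Int) (out : List Int) : Prop := out = calculate_offsets_alt size expansion_factor occupied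
instance (size : Int) (expansion_factor : Int) (occupied : List Int) (out : List Int) : Decidable (Spec_calculate_offsets size expansion_factor occupied out) := by unfold Spec_calculate_offsets; infer_instance

-- ===== CLAIM (what is proved, stated in full; the proofs are below) =====
def Claim_equal_calculate_offsets : Prop := ∀ (size : Int) (expansion_factor : Int) (occupied : List Int), Dom_calculate_offsets size expansion_factor occupied → Spec_calculate_offsets size expansion_factor occupied (calculate_offsets size expansion_factor occupied)

-- ===== LEMMAS AND PROOFS =====

-- count of occupied indices strictly below k (the common reference quantity)
def pvCnt (occupied : List Int) (k : Nat) : Int :=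
  ((List.range k).countP (fun j => occupied.contains ((j : Nat) : Int)) : Int)

-- A's fold over range(n): joint invariant giving the closed form
theorem A_inv (f : Int) (occupied : List Int) (n : Nat) :
    (PySem.List.pyRange 0 (n : Int) 1).foldl
      (fun (st : List Int × Int) i =>
        (st.1 ++ [st.2], if occupied.contains i then st.2 + 1 else st.2 + f)) ([], 0)
    = ((List.range n).map (fun (k : Nat) => f * (k : Int) - (f - 1) * pvCnt occupied k),
       f * (n : Int) - (f - 1) * pvCnt occupied n) := by
  induction n with
  | zero => simp [pvCnt]
  | succ n ih =>
    have hr : PySem.List.pyRange 0 ((n + 1 : Nat) : Int) 1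
        = PySem.List.pyRange 0 (n : Int) 1 ++ [(n : Int)] := by
      push_cast
      exact PySem.List.pyRange_one_succ_right (by positivity)
    have hc : pvCnt occupied (n + 1)
        = pvCnt occupied n + (if occupied.contains ((n : Nat) : Int) then 1 else 0) := by
      simp only [pvCnt, List.range_succ, List.countP_append, List.countP_cons, List.countP_nil]
      split_ifs <;> simp
    rw [hr, List.foldl_append, ih, List.foldl_cons, List.foldl_nil]
    refine Prod.ext ?_ ?_
    · simp [List.range_succ]
    · dsimp only
      rw [hc]
      split_ifs with h <;> push_cast <;> ring

-- stage-1 fold: length preserved and pointwise boolean value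
theorem marks_inv (size : Int) (occ : List Int) (ms : List Bool) :
    (occ.foldl (fun ms p => if 0 ≤ p ∧ p < size then PySem.List.pySetD ms p true else ms) ms).length
      = ms.length
    ∧ ∀ j : Nat, j < ms.length → ((j : Int) < size) →
      (occ.foldl (fun ms p => if 0 ≤ p ∧ p < size then PySem.List.pySetD ms p true else ms) ms).getD j false
        = (ms.getD j false || occ.contains ((j : Int))) := by
  induction occ generalizing ms with
  | nil => simp
  | cons p t ih =>
    simp only [List.foldl_cons]
    by_cases hp : 0 ≤ p ∧ p < size
    · rw [if_pos hp, PySem.List.pySetD_of_nonneg _ _ hp.1]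
      obtain ⟨ihlen, ihval⟩ := ih (ms.set p.toNat true)
      refine ⟨by rw [ihlen, List.length_set], ?_⟩
      intro j hj hjs
      rw [ihval j (by simpa using hj) hjs]
      by_cases hpj : p = (j : Int)
      · have hjj : p.toNat = j := by omega
        have hset : (ms.set p.toNat true).getD j false = true := by
          rw [hjj]
          simp [List.getD_eq_getElem?_getD, List.getElem?_set_self', List.getElem?_eq_getElem hj]
        have hct : (p :: t).contains ((j : Nat) : Int) = true := by simp [hpj]
        rw [hset, hct, Bool.true_or, Bool.or_true]
      · have hne : p.toNat ≠ j := by omega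
        have hset : (ms.set p.toNat true).getD j false = ms.getD j false := by
          simp [List.getD_eq_getElem?_getD, List.getElem?_set_ne hne]
        have hct : (p :: t).contains ((j : Nat) : Int) = t.contains ((j : Nat) : Int) := by
          simp [eq_comm, hpj]
        rw [hset, hct]
    · rw [if_neg hp]
      obtain ⟨ihlen, ihval⟩ := ih ms
      refine ⟨ihlen, fun j hj hjs => ?_⟩
      rw [ihval j hj hjs]
      have hpj : p ≠ (j : Int) := by
        rintro rfl
        exact hp ⟨by positivity, hjs⟩
      have hct : (p :: t).contains ((j : Nat) : Int) = t.contains ((j : Nat) : Int) := by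
        simp [eq_comm, hpj]
      rw [hct]

-- stage-2 fold over an arbitrary boolean list: the result is the prefix-count table
theorem counts_inv (marks : List Bool) :
    marks.foldl
      (fun cs m => cs ++ [PySem.List.pyGetD cs (-1) 0 + (if m then (1 : Int) else 0)]) [(0 : Int)]
    = (List.range (marks.length + 1)).map
        (fun k => ((marks.take k).countP id : Int)) := by
  induction marks using List.reverseRecOn with
  | nil => simp
  | append_singleton ms m ih =>
    rw [List.foldl_append, ih, List.foldl_cons, List.foldl_nil]
    have hsplit : (List.range (ms.length + 1)).map
        (fun k => (((ms.take k).countP id : Nat) : Int))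
        = (List.range ms.length).map (fun k => (((ms.take k).countP id : Nat) : Int))
          ++ [((ms.countP id : Nat) : Int)] := by
      rw [List.range_succ, List.map_append]
      simp
    rw [hsplit, PySem.List.pyGetD_neg_one_append_singleton]
    rw [List.length_append, List.length_singleton]
    have hrng : List.range (ms.length + 1 + 1)
        = List.range (ms.length + 1) ++ [ms.length + 1] := List.range_succ
    rw [hrng, List.map_append]
    have h1 : (List.range (ms.length + 1)).map
        (fun k => ((((ms ++ [m]).take k).countP id : Nat) : Int))
        = (List.range (ms.length + 1)).map
        (fun k => (((ms.take k).countP id : Nat) : Int)) := by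
      refine List.map_congr_left ?_
      intro k hk
      rw [List.take_append_of_le_length (by simpa using Nat.lt_succ_iff.mp (List.mem_range.mp hk))]
    rw [h1, hsplit]
    refine congrArg _ ?_
    have htake : (ms ++ [m]).take (ms.length + 1) = ms ++ [m] := by
      refine List.take_of_length_le ?_
      simp
    simp only [List.map_cons, List.map_nil, htake, List.countP_append, List.countP_cons,
      List.countP_nil, id]
    push_cast
    split_ifs <;> simp

-- ===== VERDICT (by name: the statement is the Claim_ definition above) =====
theorem calculate_offsets_spec : Claim_equal_calculate_offsets := by
  intro size f occupied _
  unfold Spec_calculate_offsets calculate_offsets calculate_offsets_alt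
  by_cases hs : size ≤ 0
  · simp [PySem.List.pyRange_one_eq_nil hs]
  · have hn : size = ((size.toNat : Nat) : Int) := by omega
    rw [hn]
    generalize size.toNat = n at *
    simp only [Int.toNat_natCast]
    -- stage 1 characterisation: marks is the membership table of [0, n)
    have hm := marks_inv ((n : Nat) : Int) occupied (List.replicate n false)
    set marks := occupied.foldl
      (fun ms p => if 0 ≤ p ∧ p < ((n : Nat) : Int) then PySem.List.pySetD ms p true else ms)
      (List.replicate n false) with hmarks
    have hmlen : marks.length = n := by simpa using hm.1
    have hmval : ∀ j : Nat, j < n → marks.getD j false = occupied.contains ((j : Nat) : Int) := by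
      intro j hj
      have := hm.2 j (by simpa using hj) (by exact_mod_cast hj)
      simpa using this
    have hmeq : marks = (List.range n).map (fun j => occupied.contains ((j : Nat) : Int)) := by
      refine List.ext_getElem (by simp [hmlen]) ?_
      intro j h1 h2
      have hj : j < n := by simpa [hmlen] using h1
      have := hmval j hj
      rw [List.getD_eq_getElem _ _ h1] at this
      rw [this]
      simp
    -- stage 2 characterisation: counts is the prefix-count table
    rw [A_inv]
    simp only []
    rw [hmeq, counts_inv]
    have hcnt : ∀ k : Nat, k ≤ n →
        ((((List.range n).map (fun j => occupied.contains ((j : Nat) : Int))).take k).countP id : Int)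
          = pvCnt occupied k := by
      intro k hk
      rw [← List.map_take, List.take_range, Nat.min_eq_left hk, List.countP_map]
      rfl
    -- stage 3: the final map equals A's closed form, pointwise on range n
    rw [List.length_map, List.length_range, PySem.List.pyRange_zero_natCast, List.map_map]
    refine List.map_congr_left ?_
    intro k hk
    have hk' : k < n := List.mem_range.mp hk
    simp only [Function.comp]
    rw [PySem.List.pyGetD_natCast, PySem.List.getD_map_range _ _ _ _ (by omega), hcnt k (le_of_lt hk')]
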